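-- pv_equiv track=rewrite | github.com/pypi-data/pypi-mirror-304 | packages/kkcode/kkcode-0.0.8-py3-none-any.whl/kkTools/svsTools.py | changePitch
-- ===== SOURCE A (Python) =====
-- def changePitch(pitch):
--     '''
--     更改pitch表示
--     '''
--     pitch_new = []
--     for i in pitch:
--         i = i.replace("A#", "A#/Bb")
--         i = i.replace("C#", "C#/Db")
--         i = i.replace("D#", "D#/Eb")
--         i = i.replace("F#", "F#/Gb")
--         i = i.replace("G#", "G#/Ab")
--         pitch_new.append(i)
--     return pitch_new
-- ===== SOURCE B (Python) =====
-- ENH = {"A#": "A#/Bb", "C#": "C#/Db", "D#": "D#/Eb", "F#": "F#/Gb", "G#": "G#/Ab"}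
--
-- def _convert(s):
--     parts = []
--     j = 0
--     n = len(s)
--     while j < n:
--         two = s[j:j + 2]
--         if two in ENH:
--             parts.append(ENH[two])
--             j += 2
--         else:
--             parts.append(s[j])
--             j += 1
--     return "".join(parts)
--
-- def changePitch(pitch):
--     '''
--     更改pitch表示
--     '''
--     return [_convert(s) for s in pitch]
-- ===== Notes on version B (the rewrite author's own statement) =====
-- stated objective: alternative
-- what changed: Replaces the five sequential full-string .replace scans per element by one table-driven left-to-right pass that looks up each two-character window in an enharmonic dict.
import Mathlib
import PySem

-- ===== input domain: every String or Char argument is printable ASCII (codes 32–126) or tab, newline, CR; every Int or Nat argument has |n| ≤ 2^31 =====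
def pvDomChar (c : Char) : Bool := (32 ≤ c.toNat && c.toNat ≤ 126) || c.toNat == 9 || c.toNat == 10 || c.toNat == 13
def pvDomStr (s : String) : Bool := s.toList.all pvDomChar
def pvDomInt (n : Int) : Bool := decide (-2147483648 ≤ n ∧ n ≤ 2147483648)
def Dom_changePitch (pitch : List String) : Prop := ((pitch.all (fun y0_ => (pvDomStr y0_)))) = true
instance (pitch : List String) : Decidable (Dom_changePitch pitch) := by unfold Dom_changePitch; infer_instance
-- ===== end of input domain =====

-- B replaces A's five sequential full-string .replace scans per element by a single
-- table-driven left-to-right pass over each string (same output; alternative algorithm).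


-- ===== PORT A =====
def changePitch (pitch : List String) : List String :=
  pitch.foldl (fun pitch_new i =>
    let i := PySem.Str.replace i "A#" "A#/Bb"
    let i := PySem.Str.replace i "C#" "C#/Db"
    let i := PySem.Str.replace i "D#" "D#/Eb"
    let i := PySem.Str.replace i "F#" "F#/Gb"
    let i := PySem.Str.replace i "G#" "G#/Ab"
    pitch_new ++ [i]) []

-- ===== PORT B =====
-- the ENH table lookup of Source B on a two-character window
def pvEnh? (c1 c2 : Char) : Option (List Char) :=
  if c1 = 'A' ∧ c2 = '#' then some ['A','#','/','B','b']
  else if c1 = 'C' ∧ c2 = '#' then some ['C','#','/','D','b']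
  else if c1 = 'D' ∧ c2 = '#' then some ['D','#','/','E','b']
  else if c1 = 'F' ∧ c2 = '#' then some ['F','#','/','G','b']
  else if c1 = 'G' ∧ c2 = '#' then some ['G','#','/','A','b']
  else none

-- Source B's _convert: one left-to-right pass; a two-char window found in the table emits
-- its replacement and advances by 2, otherwise the single char is kept and we advance by 1
def pvConvert : List Char → List Char
  | [] => []
  | [c] => [c]
  | c1 :: c2 :: t =>
    match pvEnh? c1 c2 with
    | some r => r ++ pvConvert t
    | none => c1 :: pvConvert (c2 :: t)

def changePitch_alt (pitch : List String) : List String :=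
  pitch.map (fun s => String.ofList (pvConvert s.toList))

-- ===== PRECONDITION & SPEC =====
def Spec_changePitch (pitch : List String) (out : List String) : Prop := out = changePitch_alt pitch
instance (pitch : List String) (out : List String) : Decidable (Spec_changePitch pitch out) := by unfold Spec_changePitch; infer_instance

-- ===== CLAIM (what is proved, stated in full; the proofs are below) =====
def Claim_equal_changePitch : Prop := ∀ (pitch : List String), Dom_changePitch pitch → Spec_changePitch pitch (changePitch pitch)

-- ===== LEMMAS AND PROOFS =====

-- fuel-free form of one str.replace with a two-character pattern [a, '#']
def pvRepl2 (a : Char) (new : List Char) : List Char → List Char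
  | [] => []
  | [c] => [c]
  | c1 :: c2 :: t =>
    if c1 = a ∧ c2 = '#' then new ++ pvRepl2 a new t
    else c1 :: pvRepl2 a new (c2 :: t)

lemma pvRepl2_nil (a : Char) (new : List Char) : pvRepl2 a new [] = [] := rfl

lemma pvRepl2_one (a c : Char) (new : List Char) : pvRepl2 a new [c] = [c] := rfl

lemma pvRepl2_hit (a : Char) (new t : List Char) :
    pvRepl2 a new (a :: '#' :: t) = new ++ pvRepl2 a new t := by
  simp [pvRepl2]

lemma pvRepl2_cons₂ (a c1 c2 : Char) (new t : List Char) (h : ¬(c1 = a ∧ c2 = '#')) :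
    pvRepl2 a new (c1 :: c2 :: t) = c1 :: pvRepl2 a new (c2 :: t) := by
  simp [pvRepl2, h]

lemma pvRepl2_cons_ne (a c : Char) (new z : List Char) (h : c ≠ a) :
    pvRepl2 a new (c :: z) = c :: pvRepl2 a new z := by
  cases z with
  | nil => rfl
  | cons c2 t => exact pvRepl2_cons₂ a c c2 new t (by simp [h])

-- the head of the result of one replace is the head of the input (patterns replace in place)
lemma pvRepl2_head (a c : Char) (x z : List Char) :
    ∃ w, pvRepl2 a (a :: x) (c :: z) = c :: w := by
  cases z with
  | nil => exact ⟨[], rfl⟩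
  | cons c2 t =>
    by_cases h : c = a ∧ c2 = '#'
    · obtain ⟨h1, h2⟩ := h
      subst h1; subst h2
      rw [pvRepl2_hit]
      exact ⟨x ++ pvRepl2 c (c :: x) t, rfl⟩
    · exact ⟨pvRepl2 a (a :: x) (c2 :: t), pvRepl2_cons₂ a c c2 (a :: x) t h⟩

-- PySem's fueled scanner equals the fuel-free form when the fuel covers the input
lemma pvGo_eq (a : Char) (new : List Char) :
    ∀ (fuel : Nat) (l acc : List Char), l.length ≤ fuel →
      PySem.Chars.replace.go [a, '#'] new fuel l acc = acc.reverse ++ pvRepl2 a new l := by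
  intro fuel
  induction fuel with
  | zero =>
    intro l acc hl
    have : l = [] := List.eq_nil_of_length_eq_zero (Nat.le_zero.mp hl)
    subst this
    rw [PySem.Chars.replace.go]
    simp [pvRepl2_nil]
  | succ fuel ih =>
    intro l acc hl
    cases l with
    | nil =>
      rw [PySem.Chars.replace.go]
      · simp [pvRepl2_nil]
      · omega
    | cons c t =>
      rw [PySem.Chars.replace.go]
      cases t with
      | nil =>
        have hpre : ([a, '#'].isPrefixOf [c]) = false := by
          simp [List.isPrefixOf]
        simp only [hpre, Bool.false_eq_true, if_false]
        rw [ih [] (c :: acc) (by simp)]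
        simp [pvRepl2_one, pvRepl2_nil]
      | cons c2 t' =>
        by_cases h : c = a ∧ c2 = '#'
        · obtain ⟨h1, h2⟩ := h
          subst h1; subst h2
          have hpre : ([c, '#'].isPrefixOf (c :: '#' :: t')) = true := by
            simp [List.isPrefixOf]
          simp only [hpre, if_true]
          have hlen : t'.length ≤ fuel := by simp at hl; omega
          rw [show (c :: '#' :: t').drop [c, '#'].length = t' from rfl, ih t' (new.reverse ++ acc) hlen]
          rw [pvRepl2_hit]
          simp
        · have hpre : ([a, '#'].isPrefixOf (c :: c2 :: t')) = false := by
            rcases (not_and_or.mp h) with h1 | h2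
            · have hb : (a == c) = false := beq_eq_false_iff_ne.mpr (fun hc => h1 hc.symm)
              simp [List.isPrefixOf, hb]
            · have hb : (('#' : Char) == c2) = false := beq_eq_false_iff_ne.mpr (fun hc => h2 hc.symm)
              simp [List.isPrefixOf, hb]
          simp only [hpre, Bool.false_eq_true, if_false]
          have hlen : (c2 :: t').length ≤ fuel := by simp at hl; simp; omega
          rw [ih (c2 :: t') (c :: acc) hlen]
          rw [pvRepl2_cons₂ a c c2 new t' h]
          simp

lemma pvReplace_eq (a : Char) (new l : List Char) :
    PySem.Chars.replace l [a, '#'] new = pvRepl2 a new l := by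
  rw [PySem.Chars.replace]
  simp only [List.isEmpty_cons, Bool.false_eq_true, if_false]
  rw [pvGo_eq a new l.length l [] le_rfl]
  simp

-- the five-fold replace chain of A, on the char-list side
def pvChain (l : List Char) : List Char :=
  pvRepl2 'G' ['G','#','/','A','b']
    (pvRepl2 'F' ['F','#','/','G','b']
      (pvRepl2 'D' ['D','#','/','E','b']
        (pvRepl2 'C' ['C','#','/','D','b']
          (pvRepl2 'A' ['A','#','/','B','b'] l))))

-- a non-matching first character passes through the whole chain
lemma pvChain_push (c1 c2 : Char) (t : List Char)
    (h : ¬(c2 = '#' ∧ (c1 = 'A' ∨ c1 = 'C' ∨ c1 = 'D' ∨ c1 = 'F' ∨ c1 = 'G'))) :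
    pvChain (c1 :: c2 :: t) = c1 :: pvChain (c2 :: t) := by
  unfold pvChain
  rw [pvRepl2_cons₂ 'A' c1 c2 _ t (by tauto)]
  obtain ⟨w1, hw1⟩ := pvRepl2_head 'A' c2 ['#','/','B','b'] t
  rw [hw1, pvRepl2_cons₂ 'C' c1 c2 _ w1 (by tauto)]
  obtain ⟨w2, hw2⟩ := pvRepl2_head 'C' c2 ['#','/','D','b'] w1
  rw [hw2, pvRepl2_cons₂ 'D' c1 c2 _ w2 (by tauto)]
  obtain ⟨w3, hw3⟩ := pvRepl2_head 'D' c2 ['#','/','E','b'] w2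
  rw [hw3, pvRepl2_cons₂ 'F' c1 c2 _ w3 (by tauto)]
  obtain ⟨w4, hw4⟩ := pvRepl2_head 'F' c2 ['#','/','G','b'] w3
  rw [hw4, pvRepl2_cons₂ 'G' c1 c2 _ w4 (by tauto)]

-- push one replace through the literal pattern 'c # Z' (c not the replace's letter)
lemma pvPush_hash (p c : Char) (new Z : List Char) (hc : c ≠ p) (hp : ('#' : Char) ≠ p) :
    pvRepl2 p new (c :: '#' :: Z) = c :: '#' :: pvRepl2 p new Z := by
  rw [pvRepl2_cons₂ p c '#' new Z (by simp [hc]), pvRepl2_cons_ne p '#' new Z hp]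

-- push one replace through a literal 5-char replacement block ending in 'b'
lemma pvPush5 (p q1 q2 q3 q4 : Char) (new X : List Char)
    (h1 : ¬(q1 = p ∧ q2 = '#')) (h2 : ¬(q2 = p ∧ q3 = '#'))
    (h3 : ¬(q3 = p ∧ q4 = '#')) (h4 : ¬(q4 = p ∧ ('b' : Char) = '#'))
    (h5 : ('b' : Char) ≠ p) :
    pvRepl2 p new (q1 :: q2 :: q3 :: q4 :: 'b' :: X) =
      q1 :: q2 :: q3 :: q4 :: 'b' :: pvRepl2 p new X := by
  rw [pvRepl2_cons₂ p q1 q2 new _ h1, pvRepl2_cons₂ p q2 q3 new _ h2,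
      pvRepl2_cons₂ p q3 q4 new _ h3, pvRepl2_cons₂ p q4 'b' new _ h4,
      pvRepl2_cons_ne p 'b' new X h5]

-- main per-string lemma: A's replace chain equals B's one-pass conversion
theorem pvChain_eq : ∀ l : List Char, pvChain l = pvConvert l
  | [] => by simp [pvChain, pvRepl2_nil, pvConvert]
  | [c] => by simp [pvChain, pvRepl2_one, pvConvert]
  | c1 :: c2 :: t => by
    by_cases h : c2 = '#' ∧ (c1 = 'A' ∨ c1 = 'C' ∨ c1 = 'D' ∨ c1 = 'F' ∨ c1 = 'G')
    · obtain ⟨h2, h1⟩ := h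
      subst h2
      have iht := pvChain_eq t
      unfold pvChain at iht
      rcases h1 with h1 | h1 | h1 | h1 | h1 <;> subst h1
      · -- 'A#'
        have hconv : pvConvert ('A' :: '#' :: t) = 'A' :: '#' :: '/' :: 'B' :: 'b' :: pvConvert t := by
          simp [pvConvert, pvEnh?]
        rw [hconv]
        unfold pvChain
        rw [pvRepl2_hit 'A' _ t]
        simp only [List.cons_append, List.nil_append]
        rw [pvPush5 'C' 'A' '#' '/' 'B' _ _ (by decide) (by decide) (by decide) (by decide) (by decide),
            pvPush5 'D' 'A' '#' '/' 'B' _ _ (by decide) (by decide) (by decide) (by decide) (by decide),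
            pvPush5 'F' 'A' '#' '/' 'B' _ _ (by decide) (by decide) (by decide) (by decide) (by decide),
            pvPush5 'G' 'A' '#' '/' 'B' _ _ (by decide) (by decide) (by decide) (by decide) (by decide),
            iht]
      · -- 'C#'
        have hconv : pvConvert ('C' :: '#' :: t) = 'C' :: '#' :: '/' :: 'D' :: 'b' :: pvConvert t := by
          simp [pvConvert, pvEnh?]
        rw [hconv]
        unfold pvChain
        rw [pvPush_hash 'A' 'C' _ t (by decide) (by decide), pvRepl2_hit 'C' _ _]
        simp only [List.cons_append, List.nil_append]
        rw [pvPush5 'D' 'C' '#' '/' 'D' _ _ (by decide) (by decide) (by decide) (by decide) (by decide),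
            pvPush5 'F' 'C' '#' '/' 'D' _ _ (by decide) (by decide) (by decide) (by decide) (by decide),
            pvPush5 'G' 'C' '#' '/' 'D' _ _ (by decide) (by decide) (by decide) (by decide) (by decide),
            iht]
      · -- 'D#'
        have hconv : pvConvert ('D' :: '#' :: t) = 'D' :: '#' :: '/' :: 'E' :: 'b' :: pvConvert t := by
          simp [pvConvert, pvEnh?]
        rw [hconv]
        unfold pvChain
        rw [pvPush_hash 'A' 'D' _ t (by decide) (by decide),
            pvPush_hash 'C' 'D' _ _ (by decide) (by decide), pvRepl2_hit 'D' _ _]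
        simp only [List.cons_append, List.nil_append]
        rw [pvPush5 'F' 'D' '#' '/' 'E' _ _ (by decide) (by decide) (by decide) (by decide) (by decide),
            pvPush5 'G' 'D' '#' '/' 'E' _ _ (by decide) (by decide) (by decide) (by decide) (by decide),
            iht]
      · -- 'F#'
        have hconv : pvConvert ('F' :: '#' :: t) = 'F' :: '#' :: '/' :: 'G' :: 'b' :: pvConvert t := by
          simp [pvConvert, pvEnh?]
        rw [hconv]
        unfold pvChain
        rw [pvPush_hash 'A' 'F' _ t (by decide) (by decide),
            pvPush_hash 'C' 'F' _ _ (by decide) (by decide),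
            pvPush_hash 'D' 'F' _ _ (by decide) (by decide), pvRepl2_hit 'F' _ _]
        simp only [List.cons_append, List.nil_append]
        rw [pvPush5 'G' 'F' '#' '/' 'G' _ _ (by decide) (by decide) (by decide) (by decide) (by decide),
            iht]
      · -- 'G#'
        have hconv : pvConvert ('G' :: '#' :: t) = 'G' :: '#' :: '/' :: 'A' :: 'b' :: pvConvert t := by
          simp [pvConvert, pvEnh?]
        rw [hconv]
        unfold pvChain
        rw [pvPush_hash 'A' 'G' _ t (by decide) (by decide),
            pvPush_hash 'C' 'G' _ _ (by decide) (by decide),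
            pvPush_hash 'D' 'G' _ _ (by decide) (by decide),
            pvPush_hash 'F' 'G' _ _ (by decide) (by decide), pvRepl2_hit 'G' _ _]
        simp only [List.cons_append, List.nil_append]
        rw [iht]
    · have hnone : pvEnh? c1 c2 = none := by
        unfold pvEnh?
        have h1 : ¬(c1 = 'A' ∧ c2 = '#') := by tauto
        have h2 : ¬(c1 = 'C' ∧ c2 = '#') := by tauto
        have h3 : ¬(c1 = 'D' ∧ c2 = '#') := by tauto
        have h4 : ¬(c1 = 'F' ∧ c2 = '#') := by tauto
        have h5 : ¬(c1 = 'G' ∧ c2 = '#') := by tauto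
        simp [h1, h2, h3, h4, h5]
      rw [pvChain_push c1 c2 t h, pvChain_eq (c2 :: t)]
      simp [pvConvert, hnone]
  termination_by l => l.length

-- per-string, on Strings: A's body equals B's body
lemma pvPerStr (s : String) :
    PySem.Str.replace (PySem.Str.replace (PySem.Str.replace (PySem.Str.replace
      (PySem.Str.replace s "A#" "A#/Bb") "C#" "C#/Db") "D#" "D#/Eb") "F#" "F#/Gb") "G#" "G#/Ab"
      = String.ofList (pvConvert s.toList) := by
  simp only [PySem.Str.replace, String.toList_ofList]
  rw [show ("A#" : String).toList = ['A', '#'] from rfl,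
      show ("C#" : String).toList = ['C', '#'] from rfl,
      show ("D#" : String).toList = ['D', '#'] from rfl,
      show ("F#" : String).toList = ['F', '#'] from rfl,
      show ("G#" : String).toList = ['G', '#'] from rfl,
      show ("A#/Bb" : String).toList = ['A','#','/','B','b'] from rfl,
      show ("C#/Db" : String).toList = ['C','#','/','D','b'] from rfl,
      show ("D#/Eb" : String).toList = ['D','#','/','E','b'] from rfl,
      show ("F#/Gb" : String).toList = ['F','#','/','G','b'] from rfl,
      show ("G#/Ab" : String).toList = ['G','#','/','A','b'] from rfl]
  rw [pvReplace_eq, pvReplace_eq, pvReplace_eq, pvReplace_eq, pvReplace_eq]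
  exact congrArg String.ofList (pvChain_eq s.toList)

-- ===== VERDICT (by name: the statement is the Claim_ definition above) =====
theorem changePitch_spec : Claim_equal_changePitch := by
  intro pitch _
  show changePitch pitch = changePitch_alt pitch
  unfold changePitch changePitch_alt
  simp only []
  rw [PySem.List.foldl_append_singleton_eq_map
        (fun i => PySem.Str.replace (PySem.Str.replace (PySem.Str.replace (PySem.Str.replace
          (PySem.Str.replace i "A#" "A#/Bb") "C#" "C#/Db") "D#" "D#/Eb") "F#" "F#/Gb") "G#" "G#/Ab")
        pitch []]
  simp only [List.nil_append]
  exact List.map_congr_left (fun s _ => pvPerStr s)
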